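-- pv_equiv track=rewrite | github.com/9oHigh/PythonAlgorithmBaekjoon | PythonAlgorithmBaekjoon/BruteForce/Prob-2231.py | sumPosi
-- ===== SOURCE A (Python) =====
-- def sumPosi(num):
--     result = num
--     while num > 0 :
--         if num < 10:
--             result+= num
--             break
--         else:
--             result += (num%10)
--             num//=10
--
--     return result
-- ===== SOURCE B (Python) =====
-- def sumPosi(num):
--     if num <= 0:
--         return num
--     return num + sum(int(d) for d in str(num))
-- ===== Notes on version B (the rewrite author's own statement) =====
-- stated objective: simpler
-- what changed: Replaces the modulus-and-division digit-extraction loop (with its break-at-last-digit special case) by a single guarded expression summing the digits of the decimal string representation.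
import Mathlib
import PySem

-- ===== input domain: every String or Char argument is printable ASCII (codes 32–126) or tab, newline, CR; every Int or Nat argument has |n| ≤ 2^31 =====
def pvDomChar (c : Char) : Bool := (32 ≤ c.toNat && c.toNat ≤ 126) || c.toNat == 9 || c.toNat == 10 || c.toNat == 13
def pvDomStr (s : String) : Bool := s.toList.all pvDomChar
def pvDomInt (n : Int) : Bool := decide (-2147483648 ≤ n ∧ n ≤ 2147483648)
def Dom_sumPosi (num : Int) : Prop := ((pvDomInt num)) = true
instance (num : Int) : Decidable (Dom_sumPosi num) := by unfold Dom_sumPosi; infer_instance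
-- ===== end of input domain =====

-- B replaces A's modulus-and-division digit-extraction loop by summing the digits of the decimal string representation (simpler, same cost).


-- ===== PORT A =====
-- the while loop of A: state (num, result); the `break` branch returns directly
def sumPosiLoop (num result : Int) : Int :=
  if num > 0 then
    if num < 10 then result + num
    else sumPosiLoop (PySem.Int.floordiv num 10) (result + PySem.Int.mod num 10)
  else result
termination_by num.toNat
decreasing_by
  have h10 : PySem.Int.floordiv num 10 = num / 10 :=
    PySem.Int.floordiv_eq_ediv_of_pos (by omega)
  rw [h10]; omega

def sumPosi (num : Int) : Int := sumPosiLoop num num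

-- ===== PORT B =====
-- int(d) for the one-character string d, as in Source B (d is always a digit there)
def sumPosiDigitVal (c : Char) : Int := (PySem.Int.ofChars? [c]).getD 0

def sumPosi_alt (num : Int) : Int :=
  if num ≤ 0 then num
  else num + ((PySem.Int.toChars num).map sumPosiDigitVal).sum

-- ===== PRECONDITION & SPEC =====
def Spec_sumPosi (num : Int) (out : Int) : Prop := out = sumPosi_alt num
instance (num : Int) (out : Int) : Decidable (Spec_sumPosi num out) := by unfold Spec_sumPosi; infer_instance

-- ===== CLAIM (what is proved, stated in full; the proofs are below) =====
def Claim_equal_sumPosi : Prop := ∀ (num : Int), Dom_sumPosi num → Spec_sumPosi num (sumPosi num)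

-- ===== LEMMAS AND PROOFS =====

lemma digitVal_digitChar (d : Nat) (hd : d < 10) :
    sumPosiDigitVal (Nat.digitChar d) = (d : Int) := by
  interval_cases d <;> decide

lemma valSum_toDigitsCore (fuel : Nat) : ∀ (n : Nat) (acc : List Char), n < fuel →
    ((Nat.toDigitsCore 10 fuel n acc).map sumPosiDigitVal).sum
      = ((Nat.digits 10 n).sum : Int) + ((acc.map sumPosiDigitVal).sum) := by
  induction fuel with
  | zero => intro n acc h; omega
  | succ f ih =>
    intro n acc h
    rw [Nat.toDigitsCore]
    by_cases h0 : n / 10 = 0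
    · have hn10 : n < 10 := by omega
      rw [if_pos h0]
      rcases Nat.eq_zero_or_pos n with h1 | h1
      · subst h1; simp [digitVal_digitChar 0 (by omega)]
      · rw [Nat.digits_def' (by omega : 1 < 10) h1, h0]
        simp [Nat.mod_eq_of_lt hn10, digitVal_digitChar n hn10]
    · have hn : 0 < n := by omega
      rw [if_neg h0]
      rw [ih (n / 10) _ (by omega)]
      rw [Nat.digits_def' (by omega : 1 < 10) hn]
      simp [digitVal_digitChar (n % 10) (Nat.mod_lt _ (by omega))]
      ring

lemma valSum_toDigits (n : Nat) :
    ((Nat.toDigits 10 n).map sumPosiDigitVal).sum = ((Nat.digits 10 n).sum : Int) := by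
  have := valSum_toDigitsCore (n + 1) n [] (by omega)
  simpa [Nat.toDigits] using this

lemma sumPosiLoop_eq_aux (k : Nat) : ∀ (num : Int), num.toNat ≤ k → ∀ result : Int,
    sumPosiLoop num result = result + ((Nat.digits 10 num.toNat).sum : Int) := by
  induction k with
  | zero =>
    intro num hk result
    rw [sumPosiLoop]
    have hpos : ¬ num > 0 := by omega
    rw [if_neg hpos]
    have : num.toNat = 0 := by omega
    simp [this]
  | succ k ih =>
    intro num hk result
    rw [sumPosiLoop]
    by_cases hpos : num > 0
    · rw [if_pos hpos]
      by_cases hlt : num < 10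
      · have : num.toNat < 10 := by omega
        rw [if_pos hlt, Nat.digits_def' (by omega : 1 < 10) (by omega : 0 < num.toNat)]
        have h0 : num.toNat / 10 = 0 := by omega
        rw [h0]
        simp [Nat.mod_eq_of_lt this]
        omega
      · rw [if_neg hlt]
        have h10 : PySem.Int.floordiv num 10 = num / 10 :=
          PySem.Int.floordiv_eq_ediv_of_pos (by omega)
        have hm : PySem.Int.mod num 10 = num % 10 :=
          PySem.Int.mod_eq_emod_of_pos (by omega)
        rw [h10, hm, ih (num / 10) (by omega)]
        rw [Nat.digits_def' (by omega : 1 < 10) (by omega : 0 < num.toNat)]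
        have hdiv : (num / 10).toNat = num.toNat / 10 := by omega
        have hmod : (num % 10 : Int) = ((num.toNat % 10 : Nat) : Int) := by omega
        rw [hdiv]
        simp only [List.sum_cons]
        push_cast
        omega
    · rw [if_neg hpos]
      have : num.toNat = 0 := by omega
      simp [this]

-- ===== VERDICT (by name: the statement is the Claim_ definition above) =====
theorem sumPosi_spec : Claim_equal_sumPosi := by
  intro num _
  unfold Spec_sumPosi sumPosi sumPosi_alt
  rw [sumPosiLoop_eq_aux num.toNat num le_rfl]
  by_cases h : num ≤ 0
  · have : num.toNat = 0 := by omega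
    simp [h, this]
  · rw [if_neg h]
    have : ¬ num < 0 := by omega
    rw [PySem.Int.toChars, if_neg this, valSum_toDigits]
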